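-- pv_equiv track=rewrite | github.com/Blaxav/Challenges-algo | AOC2017/Antoine/9.py | delete_garbages
-- ===== SOURCE A (Python) =====
-- def delete_garbages(scheme: str):
--     new_scheme, is_inside_garbage, current_garbage, previous_elem_is_exclamation_character = scheme[:], False, '', False
--     for elem in scheme:
--         if previous_elem_is_exclamation_character and is_inside_garbage:
--             previous_elem_is_exclamation_character = False
--             current_garbage += elem
--         elif elem == '!' and is_inside_garbage:
--             previous_elem_is_exclamation_character = True
--             current_garbage += elem
--         elif elem == '<' and not is_inside_garbage:
--             is_inside_garbage = True
--             current_garbage += elem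
--         elif elem == '>' and is_inside_garbage:
--             current_garbage += elem
--             new_scheme = new_scheme.replace(current_garbage, '', 1)
--             is_inside_garbage, current_garbage = False, ''
--         elif is_inside_garbage:
--             current_garbage += elem
--
--     return new_scheme
-- ===== SOURCE B (Python) =====
-- def delete_garbages(scheme: str):
--     out, buf = [], []          # kept chars; pending (possibly unclosed) garbage
--     in_garbage, escaped = False, False
--     for c in scheme:
--         if in_garbage:
--             buf.append(c)
--             if escaped:
--                 escaped = False
--             elif c == '!':
--                 escaped = True
--             elif c == '>':
--                 in_garbage = False
--                 buf.clear()
--         elif c == '<':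
--             in_garbage = True
--             buf.append(c)
--         else:
--             out.append(c)
--     return ''.join(out) + ''.join(buf)
-- ===== Notes on version B (the rewrite author's own statement) =====
-- stated objective: alternative
-- what changed: Replaces A's build-each-garbage-string-then-str.replace removal with a single left-to-right state machine (garbage/escape flags) that emits non-garbage characters directly, keeping an unclosed trailing garbage section intact as A does.
import Mathlib
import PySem

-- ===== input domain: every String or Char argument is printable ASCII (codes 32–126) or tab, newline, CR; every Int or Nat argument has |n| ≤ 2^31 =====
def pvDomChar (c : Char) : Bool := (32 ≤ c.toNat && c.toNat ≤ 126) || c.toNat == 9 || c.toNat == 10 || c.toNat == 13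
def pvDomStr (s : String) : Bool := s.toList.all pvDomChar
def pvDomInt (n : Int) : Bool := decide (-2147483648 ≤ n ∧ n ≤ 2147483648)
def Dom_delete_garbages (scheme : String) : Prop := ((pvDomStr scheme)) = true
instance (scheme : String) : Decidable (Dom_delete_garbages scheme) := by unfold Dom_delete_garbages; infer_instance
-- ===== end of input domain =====

-- B: a single-pass state machine emitting non-garbage chars, instead of A's build-each-garbage-string-then-str.replace removal; equivalence proved on all inputs.

-- ===== PORT A =====
-- hand port of Python's s.replace(old, '', 1): remove the FIRST occurrence of old;
-- exact for nonempty old (A only ever calls it with a nonempty string ending in '>')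
def pvReplace1 (s old : List Char) : List Char :=
  match s with
  | [] => []
  | c :: rest =>
    if old.isPrefixOf (c :: rest) then (c :: rest).drop old.length
    else c :: pvReplace1 rest old

-- one iteration of A's for-loop; state = (new_scheme, is_inside_garbage, current_garbage, previous_elem_is_exclamation_character)
def stepA (st : List Char × Bool × List Char × Bool) (c : Char) : List Char × Bool × List Char × Bool :=
  let (ns, ins, cg, prev) := st
  if prev && ins then (ns, ins, cg ++ [c], false)
  else if c == '!' && ins then (ns, ins, cg ++ [c], true)
  else if c == '<' && !ins then (ns, true, cg ++ [c], prev)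
  else if c == '>' && ins then (pvReplace1 ns (cg ++ [c]), false, [], prev)
  else if ins then (ns, ins, cg ++ [c], prev)
  else (ns, ins, cg, prev)

def delete_garbages (scheme : String) : String :=
  let s := scheme.toList
  String.ofList (s.foldl stepA (s, false, [], false)).1

-- ===== PORT B =====
-- one iteration of B's for-loop; state = (out, buf, in_garbage, escaped)
def stepB (st : List Char × List Char × Bool × Bool) (c : Char) : List Char × List Char × Bool × Bool :=
  let (out, buf, ing, esc) := st
  if ing then
    let buf' := buf ++ [c]
    if esc then (out, buf', true, false)
    else if c == '!' then (out, buf', true, true)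
    else if c == '>' then (out, [], false, esc)
    else (out, buf', true, esc)
  else if c == '<' then (out, buf ++ [c], true, esc)
  else (out ++ [c], buf, ing, esc)

def delete_garbages_alt (scheme : String) : String :=
  let st := scheme.toList.foldl stepB ([], [], false, false)
  String.ofList (st.1 ++ st.2.1)

-- ===== PRECONDITION & SPEC =====
def Spec_delete_garbages (scheme : String) (out : String) : Prop := out = delete_garbages_alt scheme
instance (scheme : String) (out : String) : Decidable (Spec_delete_garbages scheme out) := by unfold Spec_delete_garbages; infer_instance

-- ===== CLAIM (what is proved, stated in full; the proofs are below) =====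
def Claim_equal_delete_garbages : Prop := ∀ (scheme : String), Dom_delete_garbages scheme → Spec_delete_garbages scheme (delete_garbages scheme)

-- ===== LEMMAS AND PROOFS =====

-- removing the first occurrence of g (which starts with '<') from out ++ g ++ t, where out has no '<', yields out ++ t
lemma pvReplace1_mid (out : List Char) (hout : ∀ c ∈ out, c ≠ '<') (g t : List Char) (b : List Char)
    (hg : g = '<' :: b) : pvReplace1 (out ++ g ++ t) g = out ++ t := by
  induction out with
  | nil =>
    subst hg
    simp [pvReplace1, List.isPrefixOf_iff_prefix, List.prefix_append]
  | cons c out ih =>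
    have hc : c ≠ '<' := hout c (by simp)
    have hnp : ¬ g <+: c :: (out ++ (g ++ t)) := by
      subst hg
      rintro ⟨u, hu⟩
      injection hu with h1 _
      exact hc h1.symm
    have ihx := ih (fun x hx => hout x (by simp [hx]))
    rw [List.append_assoc] at ihx
    simp [pvReplace1, List.isPrefixOf_iff_prefix, hnp, ihx]

-- the loop invariant: A's new_scheme is B's kept output ++ B's pending garbage ++ the unprocessed suffix
lemma loop_eq (r : List Char) : ∀ (out buf : List Char) (ins esc : Bool),
    (∀ c ∈ out, c ≠ '<') →
    (ins = false → buf = [] ∧ esc = false) →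
    (ins = true → ∃ b, buf = '<' :: b) →
    (r.foldl stepA (out ++ buf ++ r, ins, buf, esc)).1 =
      (r.foldl stepB (out, buf, ins, esc)).1 ++ (r.foldl stepB (out, buf, ins, esc)).2.1 := by
  induction r with
  | nil => intro out buf ins esc _ _ _; simp
  | cons c r ih =>
    intro out buf ins esc hout hoff hon
    cases ins with
    | false =>
      obtain ⟨hb, he⟩ := hoff rfl
      subst hb; subst he
      by_cases hc : c = '<'
      · subst hc
        have := ih out ['<'] true false hout (by simp) (by exact fun _ => ⟨[], rfl⟩)
        simpa [stepA, stepB] using this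
      · have := ih (out ++ [c]) [] false false
          (by intro x hx; rcases List.mem_append.1 hx with h | h
              · exact hout x h
              · simp at h; subst h; exact hc)
          (by simp) (by simp)
        simpa [stepA, stepB, hc] using this
    | true =>
      obtain ⟨b, hb⟩ := hon rfl
      cases esc with
      | true =>
        have := ih out (buf ++ [c]) true false hout (by simp) (by subst hb; exact fun _ => ⟨b ++ [c], by simp⟩)
        simpa [stepA, stepB, List.append_assoc] using this
      | false =>
        by_cases hbang : c = '!'
        · subst hbang
          have := ih out (buf ++ ['!']) true true hout (by simp) (by subst hb; exact fun _ => ⟨b ++ ['!'], by simp⟩)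
          simpa [stepA, stepB, List.append_assoc] using this
        · by_cases hgt : c = '>'
          · subst hgt
            have hrep : pvReplace1 (out ++ (buf ++ ['>']) ++ r) (buf ++ ['>']) = out ++ r :=
              pvReplace1_mid out hout (buf ++ ['>']) r (b ++ ['>']) (by simp [hb])
            simp only [List.append_assoc, List.cons_append, List.nil_append] at hrep
            have := ih out [] false false hout (by simp) (by simp)
            simpa [stepA, stepB, hbang, List.append_assoc, hrep] using this
          · have := ih out (buf ++ [c]) true false hout (by simp) (by subst hb; exact fun _ => ⟨b ++ [c], by simp⟩)
            simpa [stepA, stepB, hbang, hgt, List.append_assoc] using this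

-- ===== VERDICT (by name: the statement is the Claim_ definition above) =====
theorem delete_garbages_spec : Claim_equal_delete_garbages := by
  intro scheme _
  unfold Spec_delete_garbages delete_garbages delete_garbages_alt
  have := loop_eq scheme.toList [] [] false false (by simp) (by simp) (by simp)
  simp at this
  simp [this]
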